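-- pv_equiv track=rewrite | github.com/tsukiyokai/vibereview | ai_reviewer.py | _find_nearest_diff_line
-- ===== SOURCE A (Python) =====
-- def _find_nearest_diff_line(
--     target: int, pos_map: dict[int, tuple[int, bool]], max_offset: int = 5,
-- ) -> int | None:
--     """验证行号是否在 diff 中，优先匹配 '+' 行，其次上下文行。"""
--     # 精确匹配 — 无论 '+' 行还是上下文行都接受
--     if target in pos_map:
--         return target
--
--     # 附近搜索第一轮：优先 '+' 行
--     for offset in range(1, max_offset + 1):
--         for candidate in [target + offset, target - offset]:
--             if candidate in pos_map:
--                 _, is_added = pos_map[candidate]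
--                 if is_added:
--                     return candidate
--
--     # 附近搜索第二轮：接受上下文行
--     for offset in range(1, max_offset + 1):
--         for candidate in [target + offset, target - offset]:
--             if candidate in pos_map:
--                 return candidate
--
--     return None
-- ===== SOURCE B (Python) =====
-- def _find_nearest_diff_line(
--     target: int, pos_map: dict[int, tuple[int, bool]], max_offset: int = 5,
-- ) -> int | None:
--     """Single-pass variant: scan offsets once, returning added lines immediately
--     and remembering the first context line as a fallback."""
--     if target in pos_map:
--         return target
--     fallback = None
--     for offset in range(1, max_offset + 1):
--         for candidate in (target + offset, target - offset):
--             if candidate in pos_map: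
--                 if pos_map[candidate][1]:
--                     return candidate
--                 if fallback is None:
--                     fallback = candidate
--     return fallback
-- ===== Notes on version B (the rewrite author's own statement) =====
-- stated objective: simpler
-- what changed: Fuses A's two separate offset scans (added-first, then context) into one single scan that returns added lines immediately and keeps the first context line seen as a fallback accumulator.
import Mathlib
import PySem

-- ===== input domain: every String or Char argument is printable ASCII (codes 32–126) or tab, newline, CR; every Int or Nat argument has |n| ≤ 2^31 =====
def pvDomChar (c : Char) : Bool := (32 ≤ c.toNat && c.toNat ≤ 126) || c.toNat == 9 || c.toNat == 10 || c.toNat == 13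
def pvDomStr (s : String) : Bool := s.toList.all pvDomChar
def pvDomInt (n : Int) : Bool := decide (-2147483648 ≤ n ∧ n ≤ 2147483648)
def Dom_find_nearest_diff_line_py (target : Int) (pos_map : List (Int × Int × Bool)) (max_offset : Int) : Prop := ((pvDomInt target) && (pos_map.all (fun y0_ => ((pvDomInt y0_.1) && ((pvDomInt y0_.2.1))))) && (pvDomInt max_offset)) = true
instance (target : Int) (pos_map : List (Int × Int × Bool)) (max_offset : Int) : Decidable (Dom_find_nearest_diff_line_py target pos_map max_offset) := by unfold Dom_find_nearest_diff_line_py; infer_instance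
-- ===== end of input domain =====

-- B fuses A's two offset scans into one pass with a first-context-line fallback accumulator (simpler decomposition; return value only).

-- ===== PORT A =====
-- dict membership / lookup on the association list: first matching key
def pvLook (pm : List (Int × Int × Bool)) (c : Int) : Option (Int × Bool) :=
  (pm.find? (fun e => e.1 == c)).map (fun e => e.2)

-- first round: prefer '+' (added) lines, candidates target+offset then target-offset
def pvPassAdded (pm : List (Int × Int × Bool)) (target : Int) : List Int → Option Int
  | [] => none
  | o :: rest =>
      match pvLook pm (target + o) with
      | some (_, true) => some (target + o)
      | _ =>
        match pvLook pm (target - o) with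
        | some (_, true) => some (target - o)
        | _ => pvPassAdded pm target rest

-- second round: accept any line present in pos_map
def pvPassAny (pm : List (Int × Int × Bool)) (target : Int) : List Int → Option Int
  | [] => none
  | o :: rest =>
      if (pvLook pm (target + o)).isSome then some (target + o)
      else if (pvLook pm (target - o)).isSome then some (target - o)
      else pvPassAny pm target rest

def find_nearest_diff_line_py (target : Int) (pos_map : List (Int × Int × Bool)) (max_offset : Int) : Option Int :=
  if (pvLook pos_map target).isSome then some target
  else
    match pvPassAdded pos_map target (PySem.List.pyRange 1 (max_offset + 1) 1) with
    | some c => some c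
    | none => pvPassAny pos_map target (PySem.List.pyRange 1 (max_offset + 1) 1)

-- ===== PORT B =====
-- single scan: return added candidates at once, record the first context candidate as fallback
def pvScanB (pm : List (Int × Int × Bool)) (target : Int) : List Int → Option Int → Option Int
  | [], fb => fb
  | o :: rest, fb =>
      match pvLook pm (target + o) with
      | some (_, true) => some (target + o)
      | v1 =>
        let fb1 := if v1.isSome && fb.isNone then some (target + o) else fb
        match pvLook pm (target - o) with
        | some (_, true) => some (target - o)
        | v2 =>
          let fb2 := if v2.isSome && fb1.isNone then some (target - o) else fb1
          pvScanB pm target rest fb2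

def find_nearest_diff_line_py_alt (target : Int) (pos_map : List (Int × Int × Bool)) (max_offset : Int) : Option Int :=
  if (pvLook pos_map target).isSome then some target
  else pvScanB pos_map target (PySem.List.pyRange 1 (max_offset + 1) 1) none

-- ===== PRECONDITION & SPEC =====
def Spec_find_nearest_diff_line_py (target : Int) (pos_map : List (Int × Int × Bool)) (max_offset : Int) (out : Option Int) : Prop := out = find_nearest_diff_line_py_alt target pos_map max_offset
instance (target : Int) (pos_map : List (Int × Int × Bool)) (max_offset : Int) (out : Option Int) : Decidable (Spec_find_nearest_diff_line_py target pos_map max_offset out) := by unfold Spec_find_nearest_diff_line_py; infer_instance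

-- ===== CLAIM (what is proved, stated in full; the proofs are below) =====
def Claim_equal_find_nearest_diff_line_py : Prop := ∀ (target : Int) (pos_map : List (Int × Int × Bool)) (max_offset : Int), Dom_find_nearest_diff_line_py target pos_map max_offset → Spec_find_nearest_diff_line_py target pos_map max_offset (find_nearest_diff_line_py target pos_map max_offset)

-- ===== LEMMAS AND PROOFS =====

lemma pvScanB_eq (pm : List (Int × Int × Bool)) (t : Int) (offs : List Int) (fb : Option Int) :
    pvScanB pm t offs fb =
      (match pvPassAdded pm t offs with
       | some c => some c
       | none => match fb with | some x => some x | none => pvPassAny pm t offs) := by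
  induction offs generalizing fb with
  | nil => cases fb <;> simp [pvScanB, pvPassAdded, pvPassAny]
  | cons o rest ih =>
    simp only [pvScanB, pvPassAdded, pvPassAny]
    rcases h1 : pvLook pm (t + o) with _ | ⟨p1, b1⟩
    · rcases h2 : pvLook pm (t - o) with _ | ⟨p2, b2⟩
      · simp [ih]
      · cases b2
        · simp only [ih]
          cases fb <;> simp
        · simp
    · cases b1
      · rcases h2 : pvLook pm (t - o) with _ | ⟨p2, b2⟩
        · simp only [ih]
          cases fb <;> simp
        · cases b2
          · simp only [ih]
            cases fb <;> simp
          · simp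
      · simp

-- ===== VERDICT (by name: the statement is the Claim_ definition above) =====
theorem find_nearest_diff_line_py_spec : Claim_equal_find_nearest_diff_line_py := by
  intro target pos_map max_offset _
  unfold Spec_find_nearest_diff_line_py find_nearest_diff_line_py find_nearest_diff_line_py_alt
  rw [pvScanB_eq]
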